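-- pv_equiv track=rewrite | github.com/triparnabh/Leetcode_Problems | Find the Fine.py | totFine
-- ===== SOURCE A (Python) =====
-- def totFine(car_num, n, date, fine):
--
--     odd = []
--     even = []
--     total_fine = 0
--
--     for i in car_num:
--         if i%2 == 0:
--             even.append(i)
--         else:
--             odd.append(i)
--
--     if date % 2 == 0:
--         for car in odd:
--             total_fine+=250
--     else:
--         for car in even:
--             total_fine+= 250
--
--     return total_fine
-- ===== SOURCE B (Python) =====
-- def totFine(car_num, n, date, fine):
--     return 250 * sum(1 for i in car_num if i % 2 != date % 2)
-- ===== Notes on version B (the rewrite author's own statement) =====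
-- stated objective: simpler
-- what changed: Replaces the odd/even partition into two lists followed by a 250-accumulating loop with a single filtered count of cars whose parity differs from the date's, returned as 250 * count.
import Mathlib
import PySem

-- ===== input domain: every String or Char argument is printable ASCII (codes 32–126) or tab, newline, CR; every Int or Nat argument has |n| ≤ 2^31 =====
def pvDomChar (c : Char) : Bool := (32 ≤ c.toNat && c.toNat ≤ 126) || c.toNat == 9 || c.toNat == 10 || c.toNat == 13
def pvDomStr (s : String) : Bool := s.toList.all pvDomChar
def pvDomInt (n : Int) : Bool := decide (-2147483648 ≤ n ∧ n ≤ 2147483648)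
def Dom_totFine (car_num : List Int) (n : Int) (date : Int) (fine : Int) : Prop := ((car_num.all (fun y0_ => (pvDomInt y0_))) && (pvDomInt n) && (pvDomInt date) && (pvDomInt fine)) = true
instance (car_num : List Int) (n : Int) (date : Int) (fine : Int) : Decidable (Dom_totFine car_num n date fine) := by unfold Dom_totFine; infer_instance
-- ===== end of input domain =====

-- B replaces A's two-list partition and 250-accumulating loop by one filtered count times 250 (simpler; same cost).


-- ===== PORT A =====
def totFine (car_num : List Int) (n : Int) (date : Int) (fine : Int) : Int :=
  -- partition loop: appends to even/odd as in A
  let p := car_num.foldl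
    (fun (p : List Int × List Int) i =>
      if PySem.Int.mod i 2 = 0 then (p.1, p.2 ++ [i]) else (p.1 ++ [i], p.2))
    ([], [])
  let odd := p.1
  let even := p.2
  if PySem.Int.mod date 2 = 0 then
    odd.foldl (fun total_fine _ => total_fine + 250) 0
  else
    even.foldl (fun total_fine _ => total_fine + 250) 0

-- ===== PORT B =====
def totFine_alt (car_num : List Int) (n : Int) (date : Int) (fine : Int) : Int :=
  250 * ((car_num.countP (fun i => PySem.Int.mod i 2 != PySem.Int.mod date 2) : Nat) : Int)

-- ===== PRECONDITION & SPEC =====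
def Spec_totFine (car_num : List Int) (n : Int) (date : Int) (fine : Int) (out : Int) : Prop := out = totFine_alt car_num n date fine
instance (car_num : List Int) (n : Int) (date : Int) (fine : Int) (out : Int) : Decidable (Spec_totFine car_num n date fine out) := by unfold Spec_totFine; infer_instance

-- ===== CLAIM (what is proved, stated in full; the proofs are below) =====
def Claim_equal_totFine : Prop := ∀ (car_num : List Int) (n : Int) (date : Int) (fine : Int), Dom_totFine car_num n date fine → Spec_totFine car_num n date fine (totFine car_num n date fine)

-- ===== LEMMAS AND PROOFS =====

theorem pv_foldl_add250 (l : List Int) (t : Int) :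
    l.foldl (fun total_fine _ => total_fine + 250) t = t + 250 * l.length := by
  induction l generalizing t with
  | nil => simp
  | cons x xs ih => simp only [List.foldl_cons, ih, List.length_cons]; push_cast; ring

theorem pv_partition (l : List Int) (o e : List Int) :
    l.foldl
      (fun (p : List Int × List Int) i =>
        if PySem.Int.mod i 2 = 0 then (p.1, p.2 ++ [i]) else (p.1 ++ [i], p.2))
      (o, e)
    = (o ++ l.filter (fun i => !(decide (PySem.Int.mod i 2 = 0))),
       e ++ l.filter (fun i => decide (PySem.Int.mod i 2 = 0))) := by
  induction l generalizing o e with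
  | nil => simp
  | cons x xs ih =>
    rw [List.foldl_cons, List.filter_cons, List.filter_cons]
    by_cases hx : PySem.Int.mod x 2 = 0
    · rw [if_pos hx, ih, decide_eq_true hx]
      simp
    · rw [if_neg hx, ih, decide_eq_false hx]
      simp

theorem pv_mod2 (i : Int) : PySem.Int.mod i 2 = 0 ∨ PySem.Int.mod i 2 = 1 := by
  have h0 := PySem.Int.mod_nonneg i (b := 2) (by omega)
  have h1 := PySem.Int.mod_lt i (b := 2) (by omega)
  omega

-- ===== VERDICT (by name: the statement is the Claim_ definition above) =====
theorem totFine_spec : Claim_equal_totFine := by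
  intro car_num n date fine _
  unfold Spec_totFine totFine totFine_alt
  rw [pv_partition]
  simp only [List.nil_append]
  rcases pv_mod2 date with hd | hd
  · rw [if_pos hd, hd, pv_foldl_add250, zero_add, List.countP_eq_length_filter]
    refine congrArg (fun k : Nat => (250 : Int) * (k : Int))
      (congrArg List.length (List.filter_congr ?_))
    intro i _
    rcases pv_mod2 i with hi | hi <;> rw [hi] <;> decide
  · rw [if_neg (by rw [hd]; omega), hd, pv_foldl_add250, zero_add,
      List.countP_eq_length_filter]
    refine congrArg (fun k : Nat => (250 : Int) * (k : Int))
      (congrArg List.length (List.filter_congr ?_))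
    intro i _
    rcases pv_mod2 i with hi | hi <;> rw [hi] <;> decide
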